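-- pv_equiv track=rewrite | github.com/TheDarkEyezor/Frank | trackr_scraper.py | _looks_like_application_link
-- ===== SOURCE A (Python) =====
-- def _looks_like_application_link(url):
--     """Heuristic to determine if a URL looks like an application link"""
--     url_lower = url.lower()
--
--     # Common application-related patterns
--     application_patterns = [
--         'apply', 'application', 'careers', 'jobs', 'internship', 'position',
--         'workday', 'greenhouse', 'lever', 'bamboohr', 'smartrecruiters',
--         'icims', 'taleo', 'successfactors', 'brassring', 'hirevue'
--     ]
--
--     return any(pattern in url_lower for pattern in application_patterns)
-- ===== SOURCE B (Python) =====
-- _APPLICATION_PATTERNS = (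
--     'apply', 'application', 'careers', 'jobs', 'internship', 'position',
--     'workday', 'greenhouse', 'lever', 'bamboohr', 'smartrecruiters',
--     'icims', 'taleo', 'successfactors', 'brassring', 'hirevue'
-- )
--
--
-- def _looks_like_application_link(url):
--     """Single left-to-right pass: at each position of the lowered URL,
--     test whether any pattern starts there."""
--     u = url.lower()
--     for i in range(len(u) + 1):
--         for p in _APPLICATION_PATTERNS:
--             if u.startswith(p, i):
--                 return True
--     return False
-- ===== Notes on version B (the rewrite author's own statement) =====
-- stated objective: alternative
-- what changed: A runs 16 independent per-pattern substring containment scans of the lowered URL via any(); B makes one position-major pass over the lowered URL, testing at each position whether any pattern starts there.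
import Mathlib
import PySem

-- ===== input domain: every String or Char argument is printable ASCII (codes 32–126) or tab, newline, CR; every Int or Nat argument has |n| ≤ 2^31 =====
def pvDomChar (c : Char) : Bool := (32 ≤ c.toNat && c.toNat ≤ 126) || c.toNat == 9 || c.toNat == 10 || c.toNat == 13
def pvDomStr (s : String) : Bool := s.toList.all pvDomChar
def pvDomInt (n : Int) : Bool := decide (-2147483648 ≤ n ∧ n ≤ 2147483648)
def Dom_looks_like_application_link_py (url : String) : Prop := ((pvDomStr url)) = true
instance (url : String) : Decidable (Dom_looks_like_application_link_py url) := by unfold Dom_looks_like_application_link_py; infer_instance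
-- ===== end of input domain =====

-- B replaces A's 16 independent `pattern in url_lower` scans by one position-major
-- pass over the lowered URL (objective: alternative; same asymptotic cost).

-- the fixed pattern list, shared verbatim by both sources
def applicationPatterns : List String :=
  ["apply", "application", "careers", "jobs", "internship", "position",
   "workday", "greenhouse", "lever", "bamboohr", "smartrecruiters",
   "icims", "taleo", "successfactors", "brassring", "hirevue"]

-- ===== PORT A =====
-- any(pattern in url_lower for pattern in application_patterns)
def looks_like_application_link_py (url : String) : Bool :=
  let url_lower := PySem.Str.lower url
  applicationPatterns.any (fun pattern => PySem.Str.isIn pattern url_lower)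

-- ===== PORT B =====
-- for i in range(len(u)+1): for p in PATTERNS: if u.startswith(p, i): return True
-- structural recursion over the suffixes of u.toList (suffix at i = u[i:])
def altScan (l : List Char) : Bool :=
  match l with
  | [] => applicationPatterns.any (fun p => PySem.Chars.startswith [] p.toList)
  | _ :: t =>
    applicationPatterns.any (fun p => PySem.Chars.startswith l p.toList) || altScan t

def looks_like_application_link_py_alt (url : String) : Bool :=
  altScan (PySem.Str.lower url).toList

-- ===== PRECONDITION & SPEC =====
def Spec_looks_like_application_link_py (url : String) (out : Bool) : Prop := out = looks_like_application_link_py_alt url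
instance (url : String) (out : Bool) : Decidable (Spec_looks_like_application_link_py url out) := by unfold Spec_looks_like_application_link_py; infer_instance

-- ===== CLAIM (what is proved, stated in full; the proofs are below) =====
def Claim_equal_looks_like_application_link_py : Prop := ∀ (url : String), Dom_looks_like_application_link_py url → Spec_looks_like_application_link_py url (looks_like_application_link_py url)

-- ===== LEMMAS AND PROOFS =====

theorem altScan_iff (l : List Char) :
    altScan l = true ↔ ∃ p ∈ applicationPatterns, p.toList <:+: l := by
  induction l with
  | nil =>
    simp only [altScan, List.any_eq_true, PySem.Chars.startswith_iff]
    constructor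
    · rintro ⟨p, hp, hpre⟩
      exact ⟨p, hp, hpre.isInfix⟩
    · rintro ⟨p, hp, hinf⟩
      exact ⟨p, hp, (List.infix_nil.mp hinf) ▸ List.nil_prefix⟩
  | cons c t ih =>
    simp only [altScan, Bool.or_eq_true, List.any_eq_true, PySem.Chars.startswith_iff, ih]
    constructor
    · rintro (⟨p, hp, hpre⟩ | ⟨p, hp, hinf⟩)
      · exact ⟨p, hp, hpre.isInfix⟩
      · exact ⟨p, hp, hinf.trans (List.suffix_cons c t).isInfix⟩
    · rintro ⟨p, hp, hinf⟩
      rcases List.infix_cons_iff.mp hinf with h | h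
      · exact Or.inl ⟨p, hp, h⟩
      · exact Or.inr ⟨p, hp, h⟩

-- ===== VERDICT (by name: the statement is the Claim_ definition above) =====
theorem looks_like_application_link_py_spec : Claim_equal_looks_like_application_link_py := by
  intro url _
  unfold Spec_looks_like_application_link_py
  unfold looks_like_application_link_py looks_like_application_link_py_alt
  rw [Bool.eq_iff_iff, altScan_iff]
  simp only [List.any_eq_true, PySem.Str.isIn_iff_infix]
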